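-- pv_equiv track=rewrite | github.com/jenkassim/itp-w2-collections-and-loops-practice | create_box/main.py | create_empty_box
-- ===== SOURCE A (Python) =====
-- def create_empty_box(height, width, character):
--     ret_val = ''
--
--     for y in range(height):
--         box_str = ''
--
--         for x in range(width):
--             if x == 0 or x == (width - 1) \
--             or y == 0 or y == (height -1) :
--                 box_str = box_str + character
--             else:
--                 box_str = box_str + " "
--
--         ret_val = ret_val + box_str + '\n'
--
--     return ret_val
-- ===== SOURCE B (Python) =====
-- def create_empty_box(height, width, character):
--     rows = []
--     for y in range(height):
--         if y == 0 or y == height - 1 or width < 2: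
--             rows.append(character * width)
--         else:
--             rows.append(character + " " * (width - 2) + character)
--     return "".join(row + "\n" for row in rows)
-- ===== Notes on version B (the rewrite author's own statement) =====
-- stated objective: simpler
-- what changed: Replaces the per-character inner loop and four-way position test with a row-only loop that classifies each row (border vs interior) and builds it by string repetition, then joins the rows with a single join.
import Mathlib
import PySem

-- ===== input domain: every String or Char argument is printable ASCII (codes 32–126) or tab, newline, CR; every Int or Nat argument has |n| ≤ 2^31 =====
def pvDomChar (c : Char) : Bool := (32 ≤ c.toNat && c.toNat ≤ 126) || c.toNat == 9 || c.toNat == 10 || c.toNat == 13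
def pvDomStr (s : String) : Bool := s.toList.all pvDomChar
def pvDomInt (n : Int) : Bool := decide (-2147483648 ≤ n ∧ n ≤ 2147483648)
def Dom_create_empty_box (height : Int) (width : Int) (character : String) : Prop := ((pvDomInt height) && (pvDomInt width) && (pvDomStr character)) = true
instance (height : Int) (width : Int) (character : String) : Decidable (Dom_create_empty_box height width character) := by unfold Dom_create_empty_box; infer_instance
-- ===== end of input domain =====

-- B replaces the per-character inner loop with a row classification (border vs interior)
-- built by string repetition and joined once: simpler decomposition, same values.

-- ===== PORT A =====
-- nested loops over range(height) × range(width), four-way position test per character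
def create_empty_box (height : Int) (width : Int) (character : String) : String :=
  let ret_val : List Char :=
    (PySem.List.pyRange 0 height 1).foldl (fun ret_val y =>
      let box_str : List Char :=
        (PySem.List.pyRange 0 width 1).foldl (fun box_str x =>
          if x = 0 ∨ x = width - 1 ∨ y = 0 ∨ y = height - 1 then box_str ++ character.toList
          else box_str ++ [' ']) []
      ret_val ++ box_str ++ ['\n']) []
  String.mk ret_val

-- ===== PORT B =====
-- one row: border row (or width < 2) = character * width; interior = char + spaces + char
def pvRow (height : Int) (width : Int) (ch : List Char) (y : Int) : List Char :=
  if y = 0 ∨ y = height - 1 ∨ width < 2 then (List.replicate width.toNat ch).flatten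
  else ch ++ List.replicate (width - 2).toNat ' ' ++ ch

def create_empty_box_alt (height : Int) (width : Int) (character : String) : String :=
  let rows := (PySem.List.pyRange 0 height 1).map (pvRow height width character.toList)
  String.mk ((rows.map (fun row => row ++ ['\n'])).flatten)

-- ===== PRECONDITION & SPEC =====
def Spec_create_empty_box (height : Int) (width : Int) (character : String) (out : String) : Prop := out = create_empty_box_alt height width character
instance (height : Int) (width : Int) (character : String) (out : String) : Decidable (Spec_create_empty_box height width character out) := by unfold Spec_create_empty_box; infer_instance

-- ===== CLAIM (what is proved, stated in full; the proofs are below) =====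
def Claim_equal_create_empty_box : Prop := ∀ (height : Int) (width : Int) (character : String), Dom_create_empty_box height width character → Spec_create_empty_box height width character (create_empty_box height width character)

-- ===== LEMMAS AND PROOFS =====

-- flatMap of a constant list function is a flattened replicate
theorem pv_flatMap_const {α β : Type} (l : List α) (c : List β) :
    l.flatMap (fun _ => c) = (List.replicate l.length c).flatten := by
  induction l with
  | nil => rfl
  | cons a t ih => simp [List.flatMap_cons, List.replicate_succ, ih]

-- A's inner loop over range(width) produces exactly B's row
theorem pv_inner_eq_row (height width : Int) (ch : List Char) (y : Int) :
    (PySem.List.pyRange 0 width 1).foldl (fun box_str x =>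
        if x = 0 ∨ x = width - 1 ∨ y = 0 ∨ y = height - 1 then box_str ++ ch
        else box_str ++ [' ']) [] = pvRow height width ch y := by
  have hfun : (fun (b : List Char) x =>
      if x = 0 ∨ x = width - 1 ∨ y = 0 ∨ y = height - 1 then b ++ ch else b ++ [' ']) =
      fun b x => b ++ (if x = 0 ∨ x = width - 1 ∨ y = 0 ∨ y = height - 1 then ch else [' ']) := by
    funext b x; split <;> rfl
  rw [hfun, PySem.List.foldl_append_eq_flatMap, List.nil_append]
  by_cases hb : y = 0 ∨ y = height - 1
  · -- border row: every position emits the character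
    have : (PySem.List.pyRange 0 width 1).flatMap
        (fun x => if x = 0 ∨ x = width - 1 ∨ y = 0 ∨ y = height - 1 then ch else [' ']) =
        (PySem.List.pyRange 0 width 1).flatMap (fun _ => ch) := by
      apply List.flatMap_congr
      intro x _
      simp [hb.elim (fun h => Or.inr (Or.inr (Or.inl h))) (fun h => Or.inr (Or.inr (Or.inr h)))]
    rw [this, pv_flatMap_const, PySem.List.length_pyRange_one]
    simp [pvRow, hb.elim (fun h => Or.inl h) (fun h => Or.inr (Or.inl h))]
  · push_neg at hb
    obtain ⟨hy0, hyh⟩ := hb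
    by_cases hw : width < 2
    · -- narrow row: character * width on both sides
      rcases lt_or_ge width 1 with hw0 | hw1
      · rw [PySem.List.pyRange_one_eq_nil (by omega)]
        simp [pvRow, hw]
        omega
      · have hw1' : width = 1 := by omega
        subst hw1'
        have : PySem.List.pyRange 0 (0 + 1) 1 = [0] := PySem.List.pyRange_one_singleton 0
        simp only [zero_add] at this
        rw [this]
        simp [pvRow]
    · -- wide interior row: char ++ spaces ++ char
      push_neg at hw
      have hsplit1 : PySem.List.pyRange 0 width 1 =
          PySem.List.pyRange 0 1 1 ++ PySem.List.pyRange 1 width 1 :=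
        PySem.List.pyRange_one_append 0 1 width (by omega) (by omega)
      have hsplit2 : PySem.List.pyRange 1 width 1 =
          PySem.List.pyRange 1 (width - 1) 1 ++ PySem.List.pyRange (width - 1) width 1 :=
        PySem.List.pyRange_one_append 1 (width - 1) width (by omega) (by omega)
      have h01 : PySem.List.pyRange 0 1 1 = [0] := by
        have := PySem.List.pyRange_one_singleton 0; simpa using this
      have hlast : PySem.List.pyRange (width - 1) width 1 = [width - 1] := by
        have := PySem.List.pyRange_one_singleton (width - 1)
        have heq : width - 1 + 1 = width := by omega
        rwa [heq] at this
      rw [hsplit1, hsplit2, h01, hlast, List.flatMap_append, List.flatMap_append]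
      have hmid : (PySem.List.pyRange 1 (width - 1) 1).flatMap
          (fun x => if x = 0 ∨ x = width - 1 ∨ y = 0 ∨ y = height - 1 then ch else [' ']) =
          (PySem.List.pyRange 1 (width - 1) 1).flatMap (fun _ => [' ']) := by
        apply List.flatMap_congr
        intro x hx
        rw [PySem.List.mem_pyRange_one] at hx
        have : ¬ (x = 0 ∨ x = width - 1 ∨ y = 0 ∨ y = height - 1) := by
          rintro (h | h | h | h) <;> omega
        simp [this]
      rw [hmid, pv_flatMap_const, PySem.List.length_pyRange_one]
      have hlen : (width - 1 - 1).toNat = (width - 2).toNat := by omega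
      have : (List.replicate (width - 2).toNat ([' '] : List Char)).flatten =
          List.replicate (width - 2).toNat ' ' := by
        induction (width - 2).toNat with
        | zero => rfl
        | succ n ih => simp [List.replicate_succ, ih]
      rw [hlen, this]
      simp [pvRow, hy0, hyh, not_lt.mpr hw]

-- ===== VERDICT (by name: the statement is the Claim_ definition above) =====
theorem create_empty_box_spec : Claim_equal_create_empty_box := by
  intro height width character _
  unfold Spec_create_empty_box create_empty_box create_empty_box_alt
  have hfun : (fun (ret_val : List Char) y =>
      ret_val ++ (PySem.List.pyRange 0 width 1).foldl (fun box_str x =>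
        if x = 0 ∨ x = width - 1 ∨ y = 0 ∨ y = height - 1 then box_str ++ character.toList
        else box_str ++ [' ']) [] ++ ['\n']) =
      fun ret_val y => ret_val ++ (pvRow height width character.toList y ++ ['\n']) := by
    funext ret_val y
    rw [pv_inner_eq_row, List.append_assoc]
  rw [hfun, PySem.List.foldl_append_eq_flatMap, List.nil_append, List.flatMap_def]
  show _ = String.mk ((List.map (fun row => row ++ ['\n']) (List.map (pvRow height width character.toList) (PySem.List.pyRange 0 height 1))).flatten)
  rw [List.map_map]
  rfl
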